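-- pv_equiv track=rewrite | github.com/thewh1teagle/renikud | grapheme-aligner/src/ipa.py | tokenize_ipa
-- ===== SOURCE A (Python) =====
-- def tokenize_ipa(ipa: str, atoms: list[str]) -> list[str]:
--     """Split an IPA string into atoms. Digraphs take priority (listed first in config)."""
--     tokens = []
--     i = 0
--     while i < len(ipa):
--         matched = False
--         for atom in atoms:
--             if ipa[i:].startswith(atom):
--                 tokens.append(atom)
--                 i += len(atom)
--                 matched = True
--                 break
--         if not matched:
--             tokens.append(ipa[i])
--             i += 1
--     return tokens
-- ===== SOURCE B (Python) =====
-- def tokenize_ipa(ipa: str, atoms: list[str]) -> list[str]: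
--     """Split an IPA string into atoms.  Same greedy priority rule as A, but the
--     atoms are indexed once in a hash map (atom -> first list index) and at each
--     position only one substring lookup per DISTINCT atom length is done, picking
--     the candidate with the smallest list index."""
--     best = {}
--     for idx, a in enumerate(atoms):
--         if a not in best:
--             best[a] = idx
--     lengths = sorted({len(a) for a in best})
--     tokens = []
--     i, n = 0, len(ipa)
--     while i < n:
--         bj = None
--         bw = None
--         for L in lengths:
--             w = ipa[i:i + L]
--             j = best.get(w)
--             if j is not None and (bj is None or j < bj):
--                 bj, bw = j, w
--         if bj is None:
--             tokens.append(ipa[i])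
--             i += 1
--         else:
--             tokens.append(bw)
--             i += len(bw)
--     return tokens
-- ===== Notes on version B (the rewrite author's own statement) =====
-- stated objective: faster
-- what changed: B replaces A's per-position linear scan over the whole atom list with a hash map (atom -> first index) built once plus, at each position, one substring lookup per distinct atom LENGTH, taking the candidate of minimal list index; cost drops from O(n*A*L) to O(n*D*L) where D = number of distinct atom lengths (small for IPA digraph inventories).
import Mathlib
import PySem

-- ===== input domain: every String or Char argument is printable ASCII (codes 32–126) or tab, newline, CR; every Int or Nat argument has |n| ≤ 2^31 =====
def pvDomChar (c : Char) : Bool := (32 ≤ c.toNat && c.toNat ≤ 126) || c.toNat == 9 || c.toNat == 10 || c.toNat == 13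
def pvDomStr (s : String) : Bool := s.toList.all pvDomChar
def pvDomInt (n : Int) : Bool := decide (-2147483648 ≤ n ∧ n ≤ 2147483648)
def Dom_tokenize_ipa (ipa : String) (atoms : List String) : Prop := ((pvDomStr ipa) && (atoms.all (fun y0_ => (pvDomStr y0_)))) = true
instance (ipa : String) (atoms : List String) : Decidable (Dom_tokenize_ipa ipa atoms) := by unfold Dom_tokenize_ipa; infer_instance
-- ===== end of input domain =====

-- B replaces A's per-position scan of the whole atom list by a hash map (atom -> first index)
-- plus one substring lookup per distinct atom length, keeping the candidate of minimal index
-- (objective: faster).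

-- ===== PORT A =====
-- A's while-loop over position i, carried as the suffix `rest` of the input; the fuel equals
-- the remaining length, which suffices whenever the Python terminates (every iteration then
-- consumes at least one character; if "" ∈ atoms is chosen the Python loops forever, and the
-- two ports — both fuelled the same way — still agree, as proved below).
def tokA_go (atoms : List String) : Nat → List Char → List String
  | 0, _ => []
  | _ + 1, [] => []
  | fuel + 1, c :: cs =>
    match atoms.find? (fun a => PySem.Chars.startswith (c :: cs) a.toList) with
    | some a => a :: tokA_go atoms fuel (List.drop a.toList.length (c :: cs))
    | none => String.ofList [c] :: tokA_go atoms fuel cs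

def tokenize_ipa (ipa : String) (atoms : List String) : List String :=
  tokA_go atoms ipa.toList.length ipa.toList

-- ===== PORT B =====
-- best = {} ; for idx, a in enumerate(atoms): if a not in best: best[a] = idx
def bestMap (atoms : List String) : PySem.Dict String Int :=
  (PySem.List.enumerate atoms 0).foldl
    (fun d p => if d.contains p.2 then d else d.insert p.2 p.1) PySem.Dict.empty

-- lengths = sorted({len(a) for a in best})
def lenList (best : PySem.Dict String Int) : List Int :=
  PySem.List.sorted (PySem.Set.ofList (best.keys.map PySem.Str.len)) (fun x => x) false

-- body of B's inner `for L in lengths` loop (bj/bw carried as one Option)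
def pickStep (best : PySem.Dict String Int) (rest : List Char) (ch : Option (Int × String)) (L : Int) : Option (Int × String) :=
  match best.get? (String.ofList (rest.take L.toNat)) with
  | none => ch
  | some j =>
    match ch with
    | none => some (j, String.ofList (rest.take L.toNat))
    | some p => if j < p.1 then some (j, String.ofList (rest.take L.toNat)) else ch

def pickTok (best : PySem.Dict String Int) (lens : List Int) (rest : List Char) : Option (Int × String) :=
  lens.foldl (pickStep best rest) none

-- B's while-loop, same shape as A's
def tokB_go (best : PySem.Dict String Int) (lens : List Int) : Nat → List Char → List String
  | 0, _ => []
  | _ + 1, [] => []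
  | fuel + 1, c :: cs =>
    match pickTok best lens (c :: cs) with
    | some p => p.2 :: tokB_go best lens fuel (List.drop p.2.toList.length (c :: cs))
    | none => String.ofList [c] :: tokB_go best lens fuel cs

def tokenize_ipa_alt (ipa : String) (atoms : List String) : List String :=
  let best := bestMap atoms
  tokB_go best (lenList best) ipa.toList.length ipa.toList

-- ===== PRECONDITION & SPEC =====
def Spec_tokenize_ipa (ipa : String) (atoms : List String) (out : List String) : Prop := out = tokenize_ipa_alt ipa atoms
instance (ipa : String) (atoms : List String) (out : List String) : Decidable (Spec_tokenize_ipa ipa atoms out) := by unfold Spec_tokenize_ipa; infer_instance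

-- ===== CLAIM (what is proved, stated in full; the proofs are below) =====
def Claim_equal_tokenize_ipa : Prop := ∀ (ipa : String) (atoms : List String), Dom_tokenize_ipa ipa atoms → Spec_tokenize_ipa ipa atoms (tokenize_ipa ipa atoms)

-- ===== LEMMAS AND PROOFS =====

-- the candidate produced at length L (value of best.get(ipa[i:i+L]) together with the substring)
def candTok (best : PySem.Dict String Int) (rest : List Char) (L : Int) : Option (Int × String) :=
  (best.get? (String.ofList (rest.take L.toNat))).map (fun j => (j, String.ofList (rest.take L.toNat)))

lemma pickStep_eq_merge (best : PySem.Dict String Int) (rest : List Char) (ch : Option (Int × String)) (L : Int) :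
    pickStep best rest ch L =
      match candTok best rest L with
      | none => ch
      | some q => match ch with
        | none => some q
        | some p => if q.1 < p.1 then some q else ch := by
  unfold pickStep candTok
  cases best.get? (String.ofList (rest.take L.toNat)) <;> cases ch <;> rfl

-- (A) none-characterisation of the inner loop
lemma pickTok_eq_none_iff (best : PySem.Dict String Int) (rest : List Char) (lens : List Int)
    (acc : Option (Int × String)) :
    lens.foldl (pickStep best rest) acc = none ↔ acc = none ∧ ∀ L ∈ lens, candTok best rest L = none := by
  induction lens generalizing acc with
  | nil => simp
  | cons L0 t ih =>
    simp only [List.foldl_cons, ih, pickStep_eq_merge, List.mem_cons]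
    constructor
    · rintro ⟨h1, h2⟩
      rcases hc : candTok best rest L0 with _ | q
      · simp [hc] at h1
        exact ⟨h1, fun L hL => hL.elim (fun h => h ▸ hc) (h2 L)⟩
      · rcases acc with _ | p <;> simp [hc] at h1 <;> (try split at h1) <;> simp_all
    · rintro ⟨h1, h2⟩
      have hc : candTok best rest L0 = none := h2 L0 (Or.inl rfl)
      subst h1
      exact ⟨by simp [hc], fun L hL => h2 L (Or.inr hL)⟩

-- (B) membership: the result of the inner loop is the accumulator or one of the candidates
lemma pickTok_mem (best : PySem.Dict String Int) (rest : List Char) (lens : List Int)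
    (acc : Option (Int × String)) (p : Int × String)
    (h : lens.foldl (pickStep best rest) acc = some p) :
    acc = some p ∨ ∃ L ∈ lens, candTok best rest L = some p := by
  induction lens generalizing acc with
  | nil => simp at h; exact Or.inl h
  | cons L0 t ih =>
    simp only [List.foldl_cons] at h
    rcases ih (pickStep best rest acc L0) h with h' | ⟨L, hL, hc⟩
    · rw [pickStep_eq_merge] at h'
      rcases hq : candTok best rest L0 with _ | q
      · simp [hq] at h'; exact Or.inl h'
      · rcases acc with _ | a
        · simp [hq] at h'
          exact Or.inr ⟨L0, by simp, h' ▸ hq⟩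
        · simp only [hq] at h'
          split at h'
          · exact Or.inr ⟨L0, by simp, h' ▸ hq⟩
          · exact Or.inl h'
    · exact Or.inr ⟨L, by simp [hL], hc⟩

-- (C) minimality: the result's index is ≤ the accumulator's and every candidate's
lemma pickTok_min (best : PySem.Dict String Int) (rest : List Char) (lens : List Int)
    (acc : Option (Int × String)) (p : Int × String)
    (h : lens.foldl (pickStep best rest) acc = some p) :
    (∀ q, acc = some q → p.1 ≤ q.1) ∧ (∀ L ∈ lens, ∀ q, candTok best rest L = some q → p.1 ≤ q.1) := by
  induction lens generalizing acc with
  | nil =>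
    simp at h
    exact ⟨fun q hq => by rw [h] at hq; cases hq; exact le_refl _, by simp⟩
  | cons L0 t ih =>
    simp only [List.foldl_cons] at h
    obtain ⟨hacc', ht⟩ := ih (pickStep best rest acc L0) h
    have key : (∀ q, acc = some q → p.1 ≤ q.1) ∧ (∀ q, candTok best rest L0 = some q → p.1 ≤ q.1) := by
      rw [pickStep_eq_merge] at hacc'
      rcases hq : candTok best rest L0 with _ | q0
      · exact ⟨fun q hq' => hacc' q (by simp [hq, hq']), by simp⟩
      · rcases acc with _ | a
        · refine ⟨by simp, fun q hq' => ?_⟩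
          cases hq'
          exact hacc' q0 (by simp [hq])
        · simp only [hq] at hacc'
          by_cases hlt : q0.1 < a.1
          · have := hacc' q0 (by simp [hlt])
            refine ⟨fun q hq' => by cases hq'; omega, fun q hq' => ?_⟩
            cases hq'; exact this
          · have := hacc' a (by simp [hlt])
            refine ⟨fun q hq' => by cases hq'; exact this, fun q hq' => ?_⟩
            cases hq'; omega
    refine ⟨key.1, fun L hL => ?_⟩
    rcases List.mem_cons.mp hL with h' | h'
    · exact h' ▸ key.2
    · exact ht L h'

-- best.get?: the dict built by B maps each atom to its first index in the list
lemma bestMap_aux (atoms : List String) (s : Int) (d : PySem.Dict String Int) (w : String) :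
    (((PySem.List.enumerate atoms s).foldl
        (fun d p => if d.contains p.2 then d else d.insert p.2 p.1) d).get? w)
      = if d.contains w then d.get? w
        else (PySem.List.index? atoms w).map (fun n => s + (n : Int)) := by
  induction atoms generalizing s d with
  | nil =>
    have hnil : PySem.List.index? ([] : List String) w = none :=
      (PySem.List.index?_eq_none_iff _ _).mpr (by simp)
    simp only [PySem.List.enumerate_nil, List.foldl_nil, hnil]
    split
    · rfl
    · exact (PySem.Dict.get?_eq_none_iff_contains d w).mpr (by simp_all)
  | cons a t ih =>
    rw [PySem.List.enumerate_cons, List.foldl_cons]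
    by_cases hw : w = a
    · subst hw
      by_cases hca : d.contains w
      · rw [if_pos hca, ih, if_pos hca, if_pos hca]
      · rw [if_neg hca, ih, if_pos (PySem.Dict.contains_insert_self d w s),
            PySem.Dict.get?_insert_self, if_neg hca, PySem.List.index?_cons_self]
        simp
    · have hstep : (if d.contains a then d else d.insert a s).get? w = d.get? w := by
        split
        · rfl
        · exact PySem.Dict.get?_insert_of_ne d s hw
      have hcstep : (if d.contains a then d else d.insert a s).contains w = d.contains w := by
        split
        · rfl
        · rw [PySem.Dict.contains_insert]; simp [hw]
      rw [ih, hstep, hcstep, PySem.List.index?_cons_of_ne t (Ne.symm hw)]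
      split
      · rfl
      · cases PySem.List.index? t w <;> (simp; try ring)

lemma bestMap_get? (atoms : List String) (w : String) :
    (bestMap atoms).get? w = (PySem.List.index? atoms w).map (fun n => (n : Int)) := by
  unfold bestMap
  rw [bestMap_aux atoms 0 PySem.Dict.empty w, if_neg (by simp [PySem.Dict.contains_empty])]
  cases PySem.List.index? atoms w <;> simp

lemma mem_keys_bestMap (atoms : List String) (w : String) : w ∈ (bestMap atoms).keys ↔ w ∈ atoms := by
  rw [← not_iff_not, ← PySem.Dict.get?_eq_none_iff_not_mem_keys, bestMap_get?,
    ← PySem.List.index?_eq_none_iff (α := String)]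
  cases PySem.List.index? atoms w <;> simp

lemma mem_lenList (atoms : List String) (L : Int) :
    L ∈ lenList (bestMap atoms) ↔ ∃ a ∈ atoms, PySem.Str.len a = L := by
  unfold lenList
  rw [PySem.List.mem_sorted, PySem.Set.mem_ofList, List.mem_map]
  constructor
  · rintro ⟨a, ha, rfl⟩; exact ⟨a, (mem_keys_bestMap atoms a).mp ha, rfl⟩
  · rintro ⟨a, ha, rfl⟩; exact ⟨a, (mem_keys_bestMap atoms a).mpr ha, rfl⟩

-- find? stops at the match of least index
lemma find?_min_index {p : String → Bool} {l : List String} {a : String}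
    (h : l.find? p = some a) :
    ∀ (j : Nat) (b : String), PySem.List.index? l b = some j → p b = true →
      ∃ i, PySem.List.index? l a = some i ∧ i ≤ j := by
  induction l with
  | nil => simp at h
  | cons c t ih =>
    intro j b hj hpb
    by_cases hpc : p c
    · rw [List.find?_cons_of_pos hpc] at h
      cases h
      exact ⟨0, PySem.List.index?_cons_self a t, Nat.zero_le _⟩
    · rw [List.find?_cons_of_neg (by simp [hpc])] at h
      have hbc : c ≠ b := fun he => hpc (he ▸ hpb)
      rw [PySem.List.index?_cons_of_ne t hbc] at hj
      rcases hj' : PySem.List.index? t b with _ | j'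
      · rw [hj'] at hj; exact absurd hj (by simp)
      · rw [hj'] at hj; simp at hj
        obtain ⟨i, hi, hij⟩ := ih h j' b hj' hpb
        have hca : c ≠ a := by
          intro he
          exact hpc (he ▸ List.find?_some h)
        rw [PySem.List.index?_cons_of_ne t hca, hi]
        exact ⟨i + 1, rfl, by omega⟩

lemma take_len_of_prefix (a : String) (rest : List Char) (h : a.toList <+: rest) :
    String.ofList (rest.take (PySem.Str.len a).toNat) = a := by
  have h1 : a.toList = rest.take a.toList.length := List.prefix_iff_eq_take.mp h
  have h2 : (PySem.Str.len a).toNat = a.toList.length := by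
    rw [PySem.Str.len_eq]; simp
  rw [h2, ← h1]
  exact String.toList_inj.mp (by simp)

-- the heart: at every position B's inner loop picks exactly the atom A's scan picks
lemma pick_eq_find (atoms : List String) (rest : List Char) :
    (pickTok (bestMap atoms) (lenList (bestMap atoms)) rest).map (fun p => p.2)
      = atoms.find? (fun a => PySem.Chars.startswith rest a.toList) := by
  rcases hf : atoms.find? (fun a => PySem.Chars.startswith rest a.toList) with _ | a
  · -- no atom is a prefix: every candidate lookup fails
    rw [hf, Option.map_eq_none_iff]
    unfold pickTok
    rw [pickTok_eq_none_iff]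
    refine ⟨rfl, fun L _ => ?_⟩
    unfold candTok
    rcases hidx : PySem.List.index? atoms (String.ofList (rest.take L.toNat)) with _ | k
    · rw [bestMap_get?, hidx]; rfl
    · exfalso
      have hmem : String.ofList (rest.take L.toNat) ∈ atoms :=
        (PySem.List.index?_isSome_iff _ _).mp (by rw [hidx]; rfl)
      have hnp := List.find?_eq_none.mp hf _ hmem
      rw [PySem.Chars.startswith_iff] at hnp
      exact hnp (by simpa using List.take_prefix L.toNat rest)
  · -- the first matching atom a: show B picks exactly (index of a, a)
    have hpa : a.toList <+: rest := by
      have := List.find?_some hf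
      rwa [PySem.Chars.startswith_iff] at this
    have hamem : a ∈ atoms := List.mem_of_find?_eq_some hf
    obtain ⟨ia, hia⟩ := Option.isSome_iff_exists.mp ((PySem.List.index?_isSome_iff atoms a).mpr hamem)
    -- B's loop finds some candidate (it sees a at L = len a)
    have hLa : PySem.Str.len a ∈ lenList (bestMap atoms) := (mem_lenList atoms _).mpr ⟨a, hamem, rfl⟩
    have hcand_a : candTok (bestMap atoms) rest (PySem.Str.len a) = some ((ia : Int), a) := by
      unfold candTok
      rw [take_len_of_prefix a rest hpa, bestMap_get?, hia]
      rfl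
    rcases hp : pickTok (bestMap atoms) (lenList (bestMap atoms)) rest with _ | p
    · exfalso
      unfold pickTok at hp
      rw [pickTok_eq_none_iff] at hp
      exact Option.some_ne_none _ (hp.2 _ hLa ▸ hcand_a).symm
    · -- p came from some candidate: p.2 ∈ atoms, p.1 = its first index, p.2 <+: rest
      obtain ⟨L, hL, hcL⟩ := (pickTok_mem _ _ _ _ _ hp).resolve_left (by simp)
      have hform : ∃ k, PySem.List.index? atoms p.2 = some k ∧ p.1 = (k : Int) ∧ p.2.toList <+: rest := by
        unfold candTok at hcL
        rw [bestMap_get?] at hcL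
        rcases hidx : PySem.List.index? atoms (String.ofList (rest.take L.toNat)) with _ | k
        · rw [hidx] at hcL; exact absurd hcL (by simp)
        · rw [hidx] at hcL
          simp only [Option.map_some, Option.bind_some, Option.pure_def,
            Option.bind_eq_bind] at hcL
          cases hcL
          refine ⟨k, ?_, rfl, ?_⟩
          · exact hidx
          · show (String.ofList (List.take L.toNat rest)).toList <+: rest
            rw [String.toList_ofList]
            exact List.take_prefix L.toNat rest
      obtain ⟨k, hk, hpk, hpre⟩ := hform
      have hp2mem : p.2 ∈ atoms := (PySem.List.index?_isSome_iff atoms p.2).mp (by rw [hk]; rfl)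
      -- minimality of A's pick: ia ≤ k
      have hia_le : ia ≤ k := by
        obtain ⟨i, hi, hile⟩ := find?_min_index hf k p.2 hk
          (by rw [PySem.Chars.startswith_iff]; exact hpre)
        rw [hia] at hi; cases hi; exact hile
      -- minimality of B's pick: p.1 ≤ ia
      have hk_le : ((k : Int)) ≤ (ia : Int) := by
        rw [← hpk]
        exact ((pickTok_min _ _ _ _ _ hp).2 _ hLa _ hcand_a)
      have hkia : k = ia := by omega
      -- both sit at the same index, hence are the same atom
      obtain ⟨hlt1, he1, _⟩ := PySem.List.getElem_of_index?_eq_some hk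
      obtain ⟨hlt2, he2, _⟩ := PySem.List.getElem_of_index?_eq_some hia
      rw [hf]
      simp only [Option.map_some]
      have hpa2 : p.2 = a := by subst hkia; rw [← he1]; exact he2
      rw [hpa2]

-- the two while-loops agree step for step
lemma go_eq (atoms : List String) : ∀ (fuel : Nat) (rest : List Char),
    tokA_go atoms fuel rest = tokB_go (bestMap atoms) (lenList (bestMap atoms)) fuel rest := by
  intro fuel
  induction fuel with
  | zero => intro rest; rfl
  | succ n ih =>
    intro rest
    rcases rest with _ | ⟨c, cs⟩
    · rfl
    · have hkey := pick_eq_find atoms (c :: cs)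
      rcases hp : pickTok (bestMap atoms) (lenList (bestMap atoms)) (c :: cs) with _ | p
      · rw [hp] at hkey; simp only [Option.map_none] at hkey
        unfold tokA_go tokB_go
        rw [← hkey, hp]
        exact congrArg _ (ih cs)
      · rw [hp] at hkey; simp only [Option.map_some] at hkey
        unfold tokA_go tokB_go
        rw [← hkey, hp]
        exact congrArg _ (ih _)

-- ===== VERDICT (by name: the statement is the Claim_ definition above) =====
theorem tokenize_ipa_spec : Claim_equal_tokenize_ipa := by
  intro ipa atoms _
  unfold Spec_tokenize_ipa tokenize_ipa tokenize_ipa_alt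
  exact go_eq atoms ipa.toList.length ipa.toList
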